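-- pv_equiv track=rewrite | github.com/kerem84/dw-mapping | scripts/generate_entity_mapping.py | aggregate_entities
-- ===== SOURCE A (Python) =====
-- from collections import OrderedDict
--
-- def aggregate_entities(rows):
--     """Attribute satirlarindan entity-level ozet cikar."""
--     entities = OrderedDict()
--
--     for row in rows:
--         target_phys = row.get("target_physical_name", "")
--         if not target_phys:
--             continue
--
--         if target_phys not in entities:
--             entities[target_phys] = {
--                 "target_schema": "dwh",
--                 "target_physical_name": target_phys,
--                 "target_logical_name": row.get("target_logical_name", ""),
--                 "source_system": row.get("source_system", ""),
--                 "source_db": row.get("source_db", ""),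
--                 "source_schema": row.get("source_schema", ""),
--                 "source_table": row.get("source_table", ""),
--                 "modul": row.get("modul", ""),
--             }
--         else:
--             # Eger logical name bos kalmissa, Master satirindan al
--             if not entities[target_phys]["target_logical_name"]:
--                 logical = row.get("target_logical_name", "")
--                 if logical:
--                     entities[target_phys]["target_logical_name"] = logical
--
--     return list(entities.values())
-- ===== SOURCE B (Python) =====
-- def _first_logical(bucket):
--     for r in bucket:
--         logical = r.get("target_logical_name", "")
--         if logical:
--             return logical
--     return ""
--
--
-- def _summarize(phys, bucket):
--     first = bucket[0]
--     return {
--         "target_schema": "dwh",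
--         "target_physical_name": phys,
--         "target_logical_name": _first_logical(bucket),
--         "source_system": first.get("source_system", ""),
--         "source_db": first.get("source_db", ""),
--         "source_schema": first.get("source_schema", ""),
--         "source_table": first.get("source_table", ""),
--         "modul": first.get("modul", ""),
--     }
--
--
-- def aggregate_entities(rows):
--     """Group rows by target_physical_name (first-appearance order), then
--     reduce each bucket to its entity summary."""
--     groups = {}
--     for row in rows:
--         phys = row.get("target_physical_name", "")
--         if not phys:
--             continue
--         if phys in groups:
--             groups[phys].append(row)
--         else:
--             groups[phys] = [row]
--     return [_summarize(phys, bucket) for phys, bucket in groups.items()]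
-- ===== Notes on version B (the rewrite author's own statement) =====
-- stated objective: alternative
-- what changed: A maintains a dict of summary records and patches the logical-name field in place while scanning; B first groups rows into per-entity buckets (first-appearance order) and then reduces each bucket to its summary (base fields from the bucket's first row, first non-empty logical name) in a second pass.
import Mathlib
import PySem

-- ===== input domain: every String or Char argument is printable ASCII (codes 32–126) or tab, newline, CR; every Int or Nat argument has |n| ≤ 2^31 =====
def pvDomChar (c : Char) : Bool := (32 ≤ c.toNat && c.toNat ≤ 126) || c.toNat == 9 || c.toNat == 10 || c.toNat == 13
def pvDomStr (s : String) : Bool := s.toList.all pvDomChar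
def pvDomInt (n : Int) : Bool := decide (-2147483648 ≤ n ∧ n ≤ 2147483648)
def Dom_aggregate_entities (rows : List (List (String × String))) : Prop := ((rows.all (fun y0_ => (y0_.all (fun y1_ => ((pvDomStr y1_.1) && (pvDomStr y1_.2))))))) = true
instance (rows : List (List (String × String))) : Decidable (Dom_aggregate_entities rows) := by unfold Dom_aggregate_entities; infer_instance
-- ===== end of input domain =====

-- B replaces A's maintain-and-patch dict of summaries by a group-then-reduce two-pass
-- decomposition (bucket rows per physical name, then summarize each bucket); same cost,
-- different structure ("alternative").

-- row.get(key, "") — rows are Python dicts, modelled as association lists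
def pvRowGet (row : List (String × String)) (k : String) : String :=
  (PySem.Dict.mk row).getD k ""

-- ===== PORT A =====
-- the dict literal A builds for a freshly seen physical name
def pvInitEntity (phys : String) (row : List (String × String)) : PySem.Dict String String :=
  PySem.Dict.mk
    [("target_schema", "dwh"),
     ("target_physical_name", phys),
     ("target_logical_name", pvRowGet row "target_logical_name"),
     ("source_system", pvRowGet row "source_system"),
     ("source_db", pvRowGet row "source_db"),
     ("source_schema", pvRowGet row "source_schema"),
     ("source_table", pvRowGet row "source_table"),
     ("modul", pvRowGet row "modul")]

-- one iteration of A's loop body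
def pvStepA (ents : PySem.Dict String (PySem.Dict String String))
    (row : List (String × String)) : PySem.Dict String (PySem.Dict String String) :=
  let target_phys := pvRowGet row "target_physical_name"
  if target_phys == "" then ents
  else if ents.contains target_phys = false then
    ents.insert target_phys (pvInitEntity target_phys row)
  else
    -- entities[target_phys]["target_logical_name"] mutation = overwrite-in-place insert
    let e := ents.getD target_phys PySem.Dict.empty
    if (e.getD "target_logical_name" "") == "" then
      let logical := pvRowGet row "target_logical_name"
      if logical == "" then ents
      else ents.insert target_phys (e.insert "target_logical_name" logical)
    else ents

def aggregate_entities (rows : List (List (String × String))) : List (List (String × String)) :=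
  ((rows.foldl pvStepA PySem.Dict.empty).values).map PySem.Dict.items

-- ===== PORT B =====
-- first non-empty target_logical_name in the bucket, else ""
def pvFirstLogical : List (List (String × String)) → String
  | [] => ""
  | r :: rs =>
    let logical := pvRowGet r "target_logical_name"
    if logical == "" then pvFirstLogical rs else logical

-- bucket[0]: buckets are built non-empty, so headD [] is exact here
def pvSummarize (phys : String) (bucket : List (List (String × String))) :
    PySem.Dict String String :=
  let first := bucket.headD []
  PySem.Dict.mk
    [("target_schema", "dwh"),
     ("target_physical_name", phys),
     ("target_logical_name", pvFirstLogical bucket),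
     ("source_system", pvRowGet first "source_system"),
     ("source_db", pvRowGet first "source_db"),
     ("source_schema", pvRowGet first "source_schema"),
     ("source_table", pvRowGet first "source_table"),
     ("modul", pvRowGet first "modul")]

-- first pass: bucket rows by physical name, first-appearance order
def pvGroup (g : PySem.Dict String (List (List (String × String))))
    (row : List (String × String)) : PySem.Dict String (List (List (String × String))) :=
  let phys := pvRowGet row "target_physical_name"
  if phys == "" then g
  else if g.contains phys then g.insert phys (g.getD phys [] ++ [row])
  else g.insert phys [row]

def aggregate_entities_alt (rows : List (List (String × String))) :
    List (List (String × String)) :=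
  ((rows.foldl pvGroup PySem.Dict.empty).items).map (fun pb => (pvSummarize pb.1 pb.2).items)

-- ===== PRECONDITION & SPEC =====
def Spec_aggregate_entities (rows : List (List (String × String))) (out : List (List (String × String))) : Prop := out = aggregate_entities_alt rows
instance (rows : List (List (String × String))) (out : List (List (String × String))) : Decidable (Spec_aggregate_entities rows out) := by unfold Spec_aggregate_entities; infer_instance

-- ===== CLAIM (what is proved, stated in full; the proofs are below) =====
def Claim_equal_aggregate_entities : Prop := ∀ (rows : List (List (String × String))), Dom_aggregate_entities rows → Spec_aggregate_entities rows (aggregate_entities rows)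

-- ===== LEMMAS AND PROOFS =====

-- coupling invariant between A's summary dict and B's bucket dict
def pvInv (ents : PySem.Dict String (PySem.Dict String String))
    (g : PySem.Dict String (List (List (String × String)))) : Prop :=
  ents.items = g.items.map (fun pb => (pb.1, pvSummarize pb.1 pb.2)) ∧
  g.keys.Nodup ∧ ∀ pb ∈ g.items, pb.2 ≠ []

lemma pvFirstLogical_append (b c : List (List (String × String))) :
    pvFirstLogical (b ++ c) =
      if pvFirstLogical b == "" then pvFirstLogical c else pvFirstLogical b := by
  induction b with
  | nil => simp [pvFirstLogical]
  | cons r rs ih =>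
    simp only [List.cons_append, pvFirstLogical, ih]
    by_cases h : pvRowGet r "target_logical_name" = ""
    · simp [h]
    · simp [h]

lemma pvSummarize_singleton (phys : String) (row : List (String × String)) :
    pvSummarize phys [row] = pvInitEntity phys row := by
  simp only [pvSummarize, pvInitEntity, pvFirstLogical, List.headD]
  by_cases h : pvRowGet row "target_logical_name" = "" <;> simp [h]

lemma pvStep_inv (ents : PySem.Dict String (PySem.Dict String String))
    (g : PySem.Dict String (List (List (String × String))))
    (row : List (String × String)) (h : pvInv ents g) :
    pvInv (pvStepA ents row) (pvGroup g row) := by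
  obtain ⟨hitems, hnd, hne⟩ := h
  have hkeys : ents.keys = g.keys := by
    simp only [PySem.Dict.keys, hitems, List.map_map]
    rfl
  have hndE : ents.keys.Nodup := hkeys ▸ hnd
  set phys := pvRowGet row "target_physical_name" with hphys
  by_cases h0 : phys = ""
  · simp only [pvStepA, pvGroup, ← hphys, h0]
    simpa using ⟨hitems, hnd, hne⟩
  have hcont : ents.contains phys = g.contains phys := by
    rw [PySem.Dict.contains_eq_decide_mem_keys, PySem.Dict.contains_eq_decide_mem_keys, hkeys]
  by_cases hc : g.contains phys = true
  · -- seen before: A maybe patches the logical name, B appends to the bucket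
    obtain ⟨b, hbmem⟩ : ∃ b, (phys, b) ∈ g.items := by
      have : phys ∈ g.keys := (PySem.Dict.contains_iff_mem_keys _ _).1 hc
      simp only [PySem.Dict.keys, List.mem_map] at this
      obtain ⟨pb, hpb, hfst⟩ := this
      exact ⟨pb.2, by rwa [show (phys, pb.2) = pb from by rw [← hfst]]⟩
    have hbD : g.getD phys [] = b := PySem.Dict.getD_of_mem_items _ hbmem hnd _
    have hbne : b ≠ [] := hne _ hbmem
    obtain ⟨x, xs, rfl⟩ : ∃ x xs, b = x :: xs := by
      cases b with
      | nil => exact absurd rfl hbne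
      | cons x xs => exact ⟨x, xs, rfl⟩
    have hEmem : (phys, pvSummarize phys (x :: xs)) ∈ ents.items := by
      rw [hitems]; exact List.mem_map_of_mem hbmem
    have heD : ents.getD phys PySem.Dict.empty = pvSummarize phys (x :: xs) :=
      PySem.Dict.getD_of_mem_items _ hEmem hndE _
    have hlogD : (pvSummarize phys (x :: xs)).getD "target_logical_name" ""
        = pvFirstLogical (x :: xs) := by
      simp [pvSummarize, PySem.Dict.getD_eq_get?_getD, PySem.Dict.get?_mk_cons]
    have hcE : ents.contains phys = true := hcont.trans hc
    have key_unique : ∀ pb ∈ g.items, pb.1 = phys → pb = (phys, x :: xs) := by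
      intro pb hpb hfst
      have h2 := PySem.Dict.getD_of_mem_items _ hpb hnd []
      rw [hfst, hbD] at h2
      obtain ⟨a, c⟩ := pb
      simp_all
    have hgi : (pvGroup g row).items
        = g.items.map (fun p => if p.1 == phys then (phys, x :: xs ++ [row]) else p) := by
      simp only [pvGroup, ← hphys]
      rw [if_neg (by simpa using h0), if_pos hc, hbD,
        PySem.Dict.items_insert_of_contains _ _ hc]
    -- A's new items list, in each of the three subcases
    refine ⟨?_, ?_, ?_⟩
    · -- items equation
      have hmap : ∀ s : PySem.Dict String String,
          pvSummarize phys (x :: xs ++ [row]) = s →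
          ents.items.map (fun p => if p.1 == phys then (phys, s) else p)
            = (pvGroup g row).items.map (fun pb => (pb.1, pvSummarize pb.1 pb.2)) := by
        intro s hs
        rw [hgi, hitems, List.map_map, List.map_map]
        refine List.map_congr_left ?_
        intro pb hpb
        by_cases hf : pb.1 = phys
        · have h3 := key_unique pb hpb hf
          simp [Function.comp, h3, ← hs]
        · simp [Function.comp, hf]
      by_cases hl : pvFirstLogical (x :: xs) = ""
      · have hx : pvRowGet x "target_logical_name" = "" ∧ pvFirstLogical xs = "" := by
          simp only [pvFirstLogical] at hl
          split_ifs at hl with hLx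
          · exact ⟨by simpa using hLx, hl⟩
          · exact absurd hl (by simpa using hLx)
        by_cases hr : pvRowGet row "target_logical_name" = ""
        · -- nothing to patch: the logical name stays ""
          have hA : pvStepA ents row = ents := by
            simp [pvStepA, ← hphys, h0, hcE, heD, hlogD, hl, hr]
          have hsum : pvSummarize phys (x :: xs ++ [row]) = pvSummarize phys (x :: xs) := by
            simp [pvSummarize, pvFirstLogical_append, pvFirstLogical, hx.1, hx.2, hr]
          rw [hA, ← hmap _ hsum, hitems, List.map_map]
          refine List.map_congr_left ?_
          intro pb hpb
          by_cases hf : pb.1 = phys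
          · have h3 := key_unique pb hpb hf
            simp [Function.comp, h3]
          · simp [Function.comp, hf]
        · -- A patches the logical name; B's longer bucket summarizes the same
          have hA : pvStepA ents row = ents.insert phys
              ((pvSummarize phys (x :: xs)).insert "target_logical_name"
                (pvRowGet row "target_logical_name")) := by
            simp [pvStepA, ← hphys, h0, hcE, heD, hlogD, hl, hr]
          have hsum : pvSummarize phys (x :: xs ++ [row])
              = (pvSummarize phys (x :: xs)).insert "target_logical_name"
                  (pvRowGet row "target_logical_name") := by
            apply PySem.Dict.ext
            rw [PySem.Dict.items_insert_of_contains _ _ (by simp [pvSummarize])]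
            simp [pvSummarize, pvFirstLogical_append, pvFirstLogical, hx.1, hx.2, hr]
          rw [hA, PySem.Dict.items_insert_of_contains _ _ hcE]
          exact hmap _ hsum
      · -- logical already set: A unchanged, the longer bucket summarizes the same
        have hA : pvStepA ents row = ents := by
          simp [pvStepA, ← hphys, h0, hcE, heD, hlogD, hl]
        have hsum : pvSummarize phys (x :: xs ++ [row]) = pvSummarize phys (x :: xs) := by
          by_cases hLx : pvRowGet x "target_logical_name" = ""
          · have hxs : ¬ pvFirstLogical xs = "" := by
              simpa [pvFirstLogical, hLx] using hl
            simp [pvSummarize, pvFirstLogical_append, pvFirstLogical, hLx, hxs]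
          · simp [pvSummarize, pvFirstLogical, hLx]
        rw [hA, ← hmap _ hsum, hitems, List.map_map]
        refine List.map_congr_left ?_
        intro pb hpb
        by_cases hf : pb.1 = phys
        · have h3 := key_unique pb hpb hf
          simp [Function.comp, h3]
        · simp [Function.comp, hf]
    · -- nodup keys
      have : (pvGroup g row).keys = g.keys := by
        simp only [pvGroup, ← hphys]
        rw [if_neg (by simpa using h0), if_pos hc, PySem.Dict.keys_insert_of_contains _ _ hc]
      rw [this]; exact hnd
    · -- buckets non-empty
      intro pb hpb
      rw [hgi] at hpb
      obtain ⟨q, hq, hqe⟩ := List.mem_map.1 hpb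
      by_cases hf : q.1 = phys
      · simp [hf] at hqe; simp [← hqe]
      · simp [hf] at hqe; exact hqe ▸ hne q hq
  · -- fresh key: both append
    have hcF : g.contains phys = false := by simpa using hc
    have hcFE : ents.contains phys = false := hcont.trans hcF
    have hA : pvStepA ents row = ents.insert phys (pvInitEntity phys row) := by
      simp [pvStepA, ← hphys, h0, hcFE]
    have hB : pvGroup g row = g.insert phys [row] := by
      simp [pvGroup, ← hphys, h0, hcF]
    refine ⟨?_, ?_, ?_⟩
    · rw [hA, hB, PySem.Dict.items_insert_of_not_contains _ _ hcFE,
        PySem.Dict.items_insert_of_not_contains _ _ hcF, hitems]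
      simp [pvSummarize_singleton]
    · rw [hB, PySem.Dict.keys_insert_of_not_contains _ _ hcF]
      refine List.nodup_append.2 ⟨hnd, List.nodup_singleton _, ?_⟩
      intro a ha b hbm hab
      have hb' : b = phys := by simpa using hbm
      rw [hab, hb'] at ha
      exact absurd ((PySem.Dict.contains_iff_mem_keys _ _).2 ha) (by simp [hcF])
    · intro pb hpb
      rw [hB, PySem.Dict.items_insert_of_not_contains _ _ hcF] at hpb
      rcases List.mem_append.1 hpb with h1 | h1
      · exact hne _ h1
      · simp only [List.mem_singleton] at h1; simp [h1]

lemma pvFold_inv (rows : List (List (String × String)))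
    (ents : PySem.Dict String (PySem.Dict String String))
    (g : PySem.Dict String (List (List (String × String)))) (h : pvInv ents g) :
    pvInv (rows.foldl pvStepA ents) (rows.foldl pvGroup g) := by
  induction rows generalizing ents g with
  | nil => exact h
  | cons r rs ih => exact ih _ _ (pvStep_inv _ _ _ h)

-- ===== VERDICT (by name: the statement is the Claim_ definition above) =====
theorem aggregate_entities_spec : Claim_equal_aggregate_entities := by
  intro rows _
  have h := pvFold_inv rows PySem.Dict.empty PySem.Dict.empty
    ⟨by simp [PySem.Dict.empty], by simp [PySem.Dict.empty, PySem.Dict.keys], by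
      simp [PySem.Dict.empty]⟩
  show aggregate_entities rows = aggregate_entities_alt rows
  unfold aggregate_entities aggregate_entities_alt
  rw [show (rows.foldl pvStepA PySem.Dict.empty).values
      = (rows.foldl pvStepA PySem.Dict.empty).items.map (·.2) from rfl, h.1]
  simp [List.map_map, Function.comp]
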